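-- pv_equiv track=rewrite | github.com/pfeuh/atariCreditsRoller | tools/buildAtariText.py | buildAtariText
-- ===== SOURCE A (Python) =====
-- REVERTED_VIDEO_ON = '<'
--
-- REVERTED_VIDEO_OFF = '>'
--
-- VIDEO_MODE_NORMAL = 1
--
-- VIDEO_MODE_REVERTED = 2
--
-- def buildAtariText(text):
--     video_mode = VIDEO_MODE_NORMAL
--     ret_str = ""
--     for car in text:
--         if car == REVERTED_VIDEO_ON:
--             video_mode = VIDEO_MODE_REVERTED
--         elif car == REVERTED_VIDEO_OFF:
--             video_mode = VIDEO_MODE_NORMAL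
--         else:
--             if video_mode == VIDEO_MODE_NORMAL:
--                 ret_str += car
--             else:
--                 ret_str += chr(ord(car) + 128)
--     return ret_str
-- ===== SOURCE B (Python) =====
-- def buildAtariText(text):
--     out = []
--     pos = 0
--     reverted = False
--     n = len(text)
--     while pos < n:
--         i = text.find('<', pos)
--         j = text.find('>', pos)
--         cands = [k for k in (i, j) if k != -1]
--         nxt = min(cands) if cands else n
--         chunk = text[pos:nxt]
--         out.append(''.join(chr(ord(c) + 128) for c in chunk) if reverted else chunk)
--         if nxt < n:
--             reverted = text[nxt] == '<'
--             pos = nxt + 1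
--         else:
--             break
--     return ''.join(out)
-- ===== Notes on version B (the rewrite author's own statement) =====
-- stated objective: faster
-- what changed: Replaced the per-character state machine (with string concatenation per char) by a find/slice chunk scan: B finds the next '<' or '>' marker, appends the whole intervening slice (mapped +128 when reverted) and flips the mode from the marker char.
import Mathlib
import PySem

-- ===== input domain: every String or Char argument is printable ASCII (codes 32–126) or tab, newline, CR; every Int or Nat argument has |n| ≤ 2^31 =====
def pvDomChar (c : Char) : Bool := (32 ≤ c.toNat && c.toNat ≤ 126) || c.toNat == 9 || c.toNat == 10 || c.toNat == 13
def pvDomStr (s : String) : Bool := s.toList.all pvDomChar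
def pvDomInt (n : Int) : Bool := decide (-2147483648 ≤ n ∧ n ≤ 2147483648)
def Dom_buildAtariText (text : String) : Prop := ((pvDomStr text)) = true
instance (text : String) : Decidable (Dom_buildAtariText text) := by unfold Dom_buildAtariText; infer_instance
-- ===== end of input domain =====

-- B replaces A's per-character video-mode state machine by a find-next-marker/slice chunk scan; objective: alternative decomposition.

-- ===== PORT A =====
-- A's per-character loop: state is (video_mode, accumulated chars); 1 = normal, 2 = reverted
def pvStepA (st : Int × List Char) (c : Char) : Int × List Char :=
  if c = '<' then (2, st.2)
  else if c = '>' then (1, st.2)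
  else if st.1 = 1 then (st.1, st.2 ++ [c])
  else (st.1, st.2 ++ [Char.ofNat (c.toNat + 128)])

def buildAtariText (text : String) : String :=
  String.ofList ((text.toList.foldl pvStepA (1, [])).2)

-- ===== PORT B =====
-- ''.join(chr(ord(c)+128) for c in chunk)
def pvMapRev (cs : List Char) : List Char := cs.map (fun c => Char.ofNat (c.toNat + 128))

-- B's chunk scan: the run up to the next marker is takeWhile (= min of the two str.find results),
-- emitted whole (mapped if reverted); the mode flips from the marker char heading the rest.
def pvGoB (rev : Bool) (cs : List Char) : List Char :=
  let chunk := cs.takeWhile (fun c => decide (c ≠ '<' ∧ c ≠ '>'))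
  let rest := cs.dropWhile (fun c => decide (c ≠ '<' ∧ c ≠ '>'))
  let piece := if rev then pvMapRev chunk else chunk
  match h : rest with
  | [] => piece
  | m :: rs => piece ++ pvGoB (m = '<') rs
termination_by cs.length
decreasing_by
  have h2 : rest.length ≤ cs.length :=
    List.length_dropWhile_le (p := fun c => decide (c ≠ '<' ∧ c ≠ '>')) (l := cs)
  rw [h] at h2
  simp at h2
  omega

def buildAtariText_alt (text : String) : String :=
  String.ofList (pvGoB false text.toList)

-- ===== PRECONDITION & SPEC =====
def Spec_buildAtariText (text : String) (out : String) : Prop := out = buildAtariText_alt text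
instance (text : String) (out : String) : Decidable (Spec_buildAtariText text out) := by unfold Spec_buildAtariText; infer_instance

-- ===== CLAIM (what is proved, stated in full; the proofs are below) =====
def Claim_equal_buildAtariText : Prop := ∀ (text : String), Dom_buildAtariText text → Spec_buildAtariText text (buildAtariText text)

-- ===== LEMMAS AND PROOFS =====

-- non-dependent unfolding equation for the chunk scan
theorem pvGoB_eq (rev : Bool) (cs : List Char) :
    pvGoB rev cs =
      (if rev then pvMapRev (cs.takeWhile (fun c => decide (c ≠ '<' ∧ c ≠ '>')))
       else cs.takeWhile (fun c => decide (c ≠ '<' ∧ c ≠ '>'))) ++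
      (match cs.dropWhile (fun c => decide (c ≠ '<' ∧ c ≠ '>')) with
       | [] => []
       | m :: rs => pvGoB (m = '<') rs) := by
  rw [pvGoB]
  split <;> rename_i heq <;> rw [heq] <;> simp

-- the chunk scan consumes one character exactly like A's state machine
theorem pvGoB_cons (rev : Bool) (c : Char) (cs : List Char) :
    pvGoB rev (c :: cs) =
      if c = '<' then pvGoB true cs
      else if c = '>' then pvGoB false cs
      else (if rev then [Char.ofNat (c.toNat + 128)] else [c]) ++ pvGoB rev cs := by
  by_cases h1 : c = '<'
  · rw [pvGoB_eq]
    simp [h1, pvMapRev]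
  · by_cases h2 : c = '>'
    · rw [pvGoB_eq]
      simp [h2, pvMapRev]
    · simp only [h1, h2, if_false]
      rw [pvGoB_eq]
      conv_rhs => rw [pvGoB_eq]
      rcases hr : List.dropWhile (fun c => !decide (c = '<') && !decide (c = '>')) cs
          with _ | ⟨m, rs⟩ <;>
        cases rev <;> simp [h1, h2, pvMapRev, hr]

theorem pvGoB_nil (rev : Bool) : pvGoB rev [] = [] := by
  rw [pvGoB_eq]; simp [pvMapRev]

-- A's fold and B's chunk scan agree, for any mode and accumulator
theorem pv_fold_eq (cs : List Char) : ∀ (m : Int) (acc : List Char),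
    (cs.foldl pvStepA (m, acc)).2 = acc ++ pvGoB (decide (m ≠ 1)) cs := by
  induction cs with
  | nil => intro m acc; simp [pvGoB_nil]
  | cons c cs ih =>
    intro m acc
    by_cases h1 : c = '<'
    · simp [List.foldl_cons, pvStepA, h1, pvGoB_cons, ih]
    · by_cases h2 : c = '>'
      · simp [List.foldl_cons, pvStepA, h1, h2, pvGoB_cons, ih]
      · by_cases hm : m = 1
        · simp [List.foldl_cons, pvStepA, h1, h2, hm, pvGoB_cons, ih]
        · simp [List.foldl_cons, pvStepA, h1, h2, hm, pvGoB_cons, ih]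

-- ===== VERDICT (by name: the statement is the Claim_ definition above) =====
theorem buildAtariText_spec : Claim_equal_buildAtariText := by
  intro text _
  unfold Spec_buildAtariText buildAtariText buildAtariText_alt
  have h := pv_fold_eq text.toList 1 []
  simp at h
  rw [h]
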